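-- pv_equiv track=rewrite | github.com/mmagnus/geekbook | engine/preprocessing.py | misc_on_text
-- ===== SOURCE A (Python) =====
-- def misc_on_text(text, verbose=False):
--     """Set of rules to replace [i] etc with <img ... >  [ OK ]"""
--     # of list
--     ntext = ''
--     for l in text.split('\n'):
--         if l == '<summary>':
--             ntext += l # + '<b>SUMMARY</b>'
--         else:
--             ntext += l + '\n'
--     return ntext
-- ===== SOURCE B (Python) =====
-- import re
--
-- def misc_on_text(text, verbose=False):
--     # Delete the newline that follows each line exactly equal to '<summary>'.
--     # Joining every split line with a trailing '\n' is the same as text + '\n'.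
--     return re.sub(r'(?m)^<summary>\n', '<summary>', text + '\n')
-- ===== Notes on version B (the rewrite author's own statement) =====
-- stated objective: idiomatic
-- what changed: A rebuilds the text line by line with string concatenation in a loop; B is a single re.sub with a multiline-anchored pattern that deletes the newline after each exact '<summary>' line of text + ' '.
import Mathlib
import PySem

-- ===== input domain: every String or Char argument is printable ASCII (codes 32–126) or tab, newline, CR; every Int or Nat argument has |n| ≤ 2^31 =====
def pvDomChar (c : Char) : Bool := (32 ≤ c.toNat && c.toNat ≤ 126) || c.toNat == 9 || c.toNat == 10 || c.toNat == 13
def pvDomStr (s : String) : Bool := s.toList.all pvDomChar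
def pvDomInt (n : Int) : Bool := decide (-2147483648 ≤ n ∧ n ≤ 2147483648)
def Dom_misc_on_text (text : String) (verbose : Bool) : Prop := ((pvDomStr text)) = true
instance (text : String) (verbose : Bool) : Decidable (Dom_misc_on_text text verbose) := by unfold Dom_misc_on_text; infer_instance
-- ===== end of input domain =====

-- B replaces A's line-by-line rebuild with one regex substitution deleting the newline
-- after each exact '<summary>' line (idiomatic); same return value everywhere.

-- ===== PORT A =====
-- for l in text.split('\n'): accumulate l (no '\n' after a '<summary>' line) into ntext
def misc_on_text (text : String) (verbose : Bool) : String :=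
  ((PySem.Str.split? text "\n").getD []).foldl
    (fun ntext l => if l == "<summary>" then ntext ++ l else ntext ++ l ++ "\n") ""

-- ===== PORT B =====
-- Hand port of Source B's  re.sub(r'(?m)^<summary>\n', '<summary>', text + '\n')  (PySem has no
-- regex): a single left-to-right scan of text + '\n'; exactly at line starts (pos 0 or after a
-- consumed '\n') a literal match of '<summary>\n' is replaced by '<summary>', which is exactly
-- re.sub's non-overlapping leftmost scan for this anchored literal pattern.
def pvSubAux : List Char → Bool → List Char
  | [], _ => []
  | c :: r, atStart =>
    if atStart && List.isPrefixOf ['<','s','u','m','m','a','r','y','>','\n'] (c :: r) then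
      ['<','s','u','m','m','a','r','y','>'] ++ pvSubAux ((c :: r).drop 10) true
    else
      c :: pvSubAux r (c == '\n')
termination_by cs _ => cs.length
decreasing_by
  · simp
  · simp

def misc_on_text_alt (text : String) (verbose : Bool) : String :=
  String.ofList (pvSubAux (text.toList ++ ['\n']) true)

-- ===== PRECONDITION & SPEC =====
def Spec_misc_on_text (text : String) (verbose : Bool) (out : String) : Prop := out = misc_on_text_alt text verbose
instance (text : String) (verbose : Bool) (out : String) : Decidable (Spec_misc_on_text text verbose out) := by unfold Spec_misc_on_text; infer_instance

-- ===== CLAIM (what is proved, stated in full; the proofs are below) =====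
def Claim_equal_misc_on_text : Prop := ∀ (text : String) (verbose : Bool), Dom_misc_on_text text verbose → Spec_misc_on_text text verbose (misc_on_text text verbose)

-- ===== LEMMAS AND PROOFS =====

-- the '<summary>' characters
def pvSC : List Char := ['<','s','u','m','m','a','r','y','>']

-- a simple structural split on '\n', used to characterise both ports
def pvSplitNL : List Char → List (List Char)
  | [] => [[]]
  | c :: r =>
    if c = '\n' then [] :: pvSplitNL r
    else
      match pvSplitNL r with
      | [] => [[c]]
      | p :: ps => (c :: p) :: ps

-- the per-line transformation both programs perform
def pvLine (p : List Char) : List Char := if p = pvSC then pvSC else p ++ ['\n']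

theorem pvSplitNL_ne_nil (s : List Char) : pvSplitNL s ≠ [] := by
  induction s with
  | nil => simp [pvSplitNL]
  | cons c r ih =>
    simp only [pvSplitNL]
    split
    · simp
    · cases h : pvSplitNL r with
      | nil => simp
      | cons p ps => simp

theorem pvSplitNL_flatten (s : List Char) :
    ((pvSplitNL s).map (· ++ ['\n'])).flatten = s ++ ['\n'] := by
  induction s with
  | nil => simp [pvSplitNL]
  | cons c r ih =>
    simp only [pvSplitNL]
    split
    · subst ‹c = '\n'›; simpa using ih
    · cases h : pvSplitNL r with
      | nil => exact absurd h (pvSplitNL_ne_nil r)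
      | cons p ps =>
        rw [h] at ih
        simpa using ih

theorem pvSplitNL_noLF (s : List Char) : ∀ p ∈ pvSplitNL s, '\n' ∉ p := by
  induction s with
  | nil => simp [pvSplitNL]
  | cons c r ih =>
    simp only [pvSplitNL]
    split
    · intro p hp
      rcases List.mem_cons.mp hp with h | h
      · simp [h]
      · exact ih p h
    · cases h : pvSplitNL r with
      | nil => exact absurd h (pvSplitNL_ne_nil r)
      | cons q qs =>
        intro p hp
        rcases List.mem_cons.mp hp with h' | h'
        · subst h'
          have hq : '\n' ∉ q := ih q (by rw [h]; exact List.mem_cons_self ..)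
          simp only [List.mem_cons]
          push_neg
          exact ⟨fun hc => ‹¬ c = '\n'› hc.symm, hq⟩
        · exact ih p (by rw [h]; exact List.mem_cons_of_mem _ h')

-- the go-loop of PySem.Chars.splitOn on separator ['\n'] computes pvSplitNL
theorem pvGo_eq (fuel : Nat) :
    ∀ (l cur : List Char) (acc : List (List Char)), l.length ≤ fuel →
      PySem.Chars.splitOn.go ['\n'] fuel l cur acc =
        acc.reverse ++ (match pvSplitNL l with
                        | [] => []
                        | p :: ps => (cur.reverse ++ p) :: ps) := by
  induction fuel with
  | zero =>
    intro l cur acc hl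
    have : l = [] := List.length_eq_zero_iff.mp (Nat.le_zero.mp hl)
    subst this
    simp [PySem.Chars.splitOn.go, pvSplitNL]
  | succ f ih =>
    intro l cur acc hl
    cases l with
    | nil => simp [PySem.Chars.splitOn.go, pvSplitNL]
    | cons c rest =>
      rw [PySem.Chars.splitOn.go]
      have hpre : (['\n'].isPrefixOf (c :: rest)) = ('\n' == c) := by
        simp [List.isPrefixOf]
      by_cases hc : c = '\n'
      · subst hc
        rw [hpre]
        simp only [BEq.rfl, if_pos]
        rw [show List.drop (['\n'] : List Char).length ('\n' :: rest) = rest by simp]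
        rw [ih rest [] (cur.reverse :: acc) (by simpa using Nat.le_of_succ_le_succ hl)]
        cases h : pvSplitNL rest with
        | nil => exact absurd h (pvSplitNL_ne_nil rest)
        | cons p ps => simp [pvSplitNL, h]
      · rw [hpre]
        have : ('\n' == c) = false := by simpa using fun h => hc h.symm
        rw [this]
        simp only [Bool.false_eq_true, if_false]
        rw [ih rest (c :: cur) acc (by simpa using Nat.le_of_succ_le_succ hl)]
        cases h : pvSplitNL rest with
        | nil => exact absurd h (pvSplitNL_ne_nil rest)
        | cons p ps => simp [pvSplitNL, hc, h]

theorem pvSplitOn_eq (s : List Char) :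
    PySem.Chars.splitOn s ['\n'] = pvSplitNL s := by
  rw [PySem.Chars.splitOn, pvGo_eq (s.length + 1) s [] [] (Nat.le_succ _)]
  cases h : pvSplitNL s with
  | nil => exact absurd h (pvSplitNL_ne_nil s)
  | cons p ps => simp

-- A's fold over the split lines is the flatten of pvLine over the pieces
theorem pvFoldA (ls : List (List Char)) :
    ∀ acc : List Char,
      (ls.map String.ofList).foldl
        (fun ntext l => if l == "<summary>" then ntext ++ l else ntext ++ l ++ "\n")
        (String.ofList acc)
      = String.ofList (acc ++ (ls.map pvLine).flatten) := by
  induction ls with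
  | nil => intro acc; simp
  | cons p ps ih =>
    intro acc
    simp only [List.map_cons, List.foldl_cons]
    have hsum : ("<summary>" : String) = String.ofList pvSC := rfl
    by_cases hp : p = pvSC
    · subst hp
      have hc : (String.ofList pvSC == ("<summary>" : String)) = true :=
        beq_iff_eq.mpr hsum.symm
      rw [hc, if_pos rfl]
      rw [show String.ofList acc ++ String.ofList pvSC = String.ofList (acc ++ pvSC) by simp]
      rw [ih (acc ++ pvSC)]
      simp [pvLine]
    · have hc : (String.ofList p == ("<summary>" : String)) = false :=
        beq_eq_false_iff_ne.mpr (fun h => hp (String.ofList_inj.mp (h.trans hsum)))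
      rw [hc]
      simp only [Bool.false_eq_true, if_false]
      rw [show String.ofList acc ++ String.ofList p ++ "\n"
            = String.ofList (acc ++ (p ++ ['\n'])) by
        rw [String.append_assoc, show ("\n" : String) = String.ofList ['\n'] from rfl]; simp]
      rw [ih (acc ++ (p ++ ['\n']))]
      simp [pvLine, hp]

-- if p ++ ['\n'] is a prefix of l ++ '\n' :: rest and neither p nor l contains '\n', then l = p
theorem pvPrefixLine : ∀ (l p rest : List Char), '\n' ∉ l → '\n' ∉ p →
    List.isPrefixOf (p ++ ['\n']) (l ++ '\n' :: rest) = true → l = p := by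
  intro l
  induction l with
  | nil =>
    intro p rest _ hp hpre
    cases p with
    | nil => rfl
    | cons q qs =>
      simp only [List.cons_append, List.nil_append, List.isPrefixOf] at hpre
      have : q = '\n' := by
        have := (Bool.and_eq_true _ _).mp hpre |>.1
        exact (beq_iff_eq.mp this)
      exact absurd (this ▸ List.mem_cons_self ..) hp
  | cons c l' ih =>
    intro p rest hl hp hpre
    cases p with
    | nil =>
      simp only [List.nil_append, List.cons_append, List.isPrefixOf] at hpre
      have : '\n' = c := beq_iff_eq.mp ((Bool.and_eq_true _ _).mp hpre |>.1)
      exact absurd (this ▸ List.mem_cons_self ..) hl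
    | cons q qs =>
      simp only [List.cons_append, List.isPrefixOf, Bool.and_eq_true, beq_iff_eq] at hpre
      obtain ⟨hq, hrest⟩ := hpre
      have := ih qs rest (fun h => hl (List.mem_cons_of_mem _ h))
        (fun h => hp (List.mem_cons_of_mem _ h)) (by simpa [List.isPrefixOf] using hrest)
      rw [hq, this]

-- scanning mid-line: no replacement happens until the next '\n'
theorem pvSubAux_mid : ∀ (l rest : List Char), '\n' ∉ l →
    pvSubAux (l ++ '\n' :: rest) false = l ++ '\n' :: pvSubAux rest true := by
  intro l
  induction l with
  | nil =>
    intro rest _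
    simp [pvSubAux]
  | cons c l' ih =>
    intro rest hl
    have hc : c ≠ '\n' := fun h => hl (h ▸ List.mem_cons_self ..)
    rw [List.cons_append, pvSubAux]
    simp only [Bool.false_and, Bool.false_eq_true, if_false]
    rw [show (c == '\n') = false by simpa using hc]
    rw [ih rest (fun h => hl (List.mem_cons_of_mem _ h))]
    simp

-- one whole line at a line start
theorem pvSubAux_line (l rest : List Char) (hl : '\n' ∉ l) :
    pvSubAux (l ++ '\n' :: rest) true = pvLine l ++ pvSubAux rest true := by
  by_cases hsum : l = pvSC
  · subst hsum
    rw [show (pvSC ++ '\n' :: rest) = '<' :: ('s' :: 'u' :: 'm' :: 'm' :: 'a' :: 'r' :: 'y' :: '>' :: '\n' :: rest) from rfl]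
    rw [pvSubAux]
    have hpre : List.isPrefixOf ['<','s','u','m','m','a','r','y','>','\n']
        ('<' :: 's' :: 'u' :: 'm' :: 'm' :: 'a' :: 'r' :: 'y' :: '>' :: '\n' :: rest) = true := by
      simp [List.isPrefixOf]
    rw [hpre]
    simp [pvLine, pvSC]
  · have hnp : List.isPrefixOf ['<','s','u','m','m','a','r','y','>','\n'] (l ++ '\n' :: rest) = false := by
      by_contra h
      have h' : List.isPrefixOf (pvSC ++ ['\n']) (l ++ '\n' :: rest) = true := by
        rw [show pvSC ++ ['\n'] = ['<','s','u','m','m','a','r','y','>','\n'] from rfl]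
        simpa using h
      exact hsum (pvPrefixLine l pvSC rest hl (by decide) h')
    cases l with
    | nil =>
      rw [List.nil_append, pvSubAux]
      rw [List.nil_append] at hnp
      rw [hnp]
      simp [pvLine, pvSC]
    | cons c l' =>
      have hc : c ≠ '\n' := fun h => hl (h ▸ List.mem_cons_self ..)
      rw [List.cons_append, pvSubAux]
      rw [List.cons_append] at hnp
      rw [hnp]
      simp only [Bool.and_false, Bool.false_eq_true, if_false]
      rw [show (c == '\n') = false by simpa using hc]
      rw [pvSubAux_mid l' rest (fun h => hl (List.mem_cons_of_mem _ h))]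
      simp [pvLine, hsum]

-- B over the flattened lines
theorem pvSubAux_lines : ∀ ls : List (List Char), (∀ p ∈ ls, '\n' ∉ p) →
    pvSubAux ((ls.map (· ++ ['\n'])).flatten) true = (ls.map pvLine).flatten := by
  intro ls
  induction ls with
  | nil => intro _; simp [pvSubAux]
  | cons p ps ih =>
    intro h
    simp only [List.map_cons, List.flatten_cons]
    rw [show (p ++ ['\n']) ++ (ps.map (· ++ ['\n'])).flatten
          = p ++ '\n' :: (ps.map (· ++ ['\n'])).flatten by simp]
    rw [pvSubAux_line p _ (h p (List.mem_cons_self ..))]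
    rw [ih (fun q hq => h q (List.mem_cons_of_mem _ hq))]

-- ===== VERDICT (by name: the statement is the Claim_ definition above) =====
theorem misc_on_text_spec : Claim_equal_misc_on_text := by
  intro text verbose _
  unfold Spec_misc_on_text misc_on_text misc_on_text_alt
  have hsplit : PySem.Str.split? text "\n"
      = some ((pvSplitNL text.toList).map String.ofList) := by
    rw [PySem.Str.split?, PySem.Chars.split?]
    simp [pvSplitOn_eq]
  rw [hsplit]
  simp only [Option.getD_some]
  rw [show ("" : String) = String.ofList [] from rfl, pvFoldA, List.nil_append]
  rw [← pvSplitNL_flatten text.toList,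
    pvSubAux_lines (pvSplitNL text.toList) (pvSplitNL_noLF text.toList)]
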